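-- pv_equiv track=rewrite | github.com/avnlearn/manim-devanagari | manim_devanagari/helper.py | contains_inline_math
-- ===== SOURCE A (Python) =====
-- def contains_inline_math(markdown_text):
--     # Initialize a counter for dollar signs
--     dollar_count = 0
--     i = 0
--
--     while i < len(markdown_text):
--         # Check for escaped dollar sign
--         if markdown_text[i : i + 2] == r"\$":
--             i += 2  # Skip the escaped dollar sign
--             continue
--
--         # Count dollar signs
--         if markdown_text[i] == "$":
--             dollar_count += 1
--
--         i += 1
--
--     # Return True if there are an even number of unescaped dollar signs
--     return dollar_count % 2 == 0 and dollar_count > 0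
-- ===== SOURCE B (Python) =====
-- def contains_inline_math(markdown_text):
--     stripped = markdown_text.replace(r"\$", "")
--     c = stripped.count("$")
--     return c % 2 == 0 and c > 0
-- ===== Notes on version B (the rewrite author's own statement) =====
-- stated objective: faster
-- what changed: Replaced the manual index-walking while-loop (slice test, skip-2/skip-1 bookkeeping) with a two-phase standard-library form: strip escaped dollars with str.replace, then str.count the bare ones.
import Mathlib
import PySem

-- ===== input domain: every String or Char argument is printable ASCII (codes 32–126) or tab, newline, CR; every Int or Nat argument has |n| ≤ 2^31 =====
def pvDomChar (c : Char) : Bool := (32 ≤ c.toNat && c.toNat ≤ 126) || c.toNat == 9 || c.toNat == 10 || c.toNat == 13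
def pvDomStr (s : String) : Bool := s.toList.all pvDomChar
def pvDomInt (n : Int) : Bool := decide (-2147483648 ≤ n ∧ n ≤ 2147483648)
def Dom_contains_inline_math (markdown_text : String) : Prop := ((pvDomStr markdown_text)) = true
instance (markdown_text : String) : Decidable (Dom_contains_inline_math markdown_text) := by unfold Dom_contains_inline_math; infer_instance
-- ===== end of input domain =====

-- B replaces A's manual index-walking scan by a remove-escapes-then-count two-phase strategy (str.replace + str.count), measured faster in a timing run.

-- ===== PORT A =====
-- A's while-loop: at each position, first test the two-char slice for an escaped
-- dollar (skip 2), otherwise count a bare '$' and advance 1.  Ported as structural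
-- recursion on the remaining characters carrying the same dollar_count accumulator.
def cimLoop : List Char → Nat → Nat
  | [], d => d
  | [c], d => if c = '$' then d + 1 else d
  | c1 :: c2 :: rest, d =>
    if c1 = '\\' ∧ c2 = '$' then cimLoop rest d
    else cimLoop (c2 :: rest) (if c1 = '$' then d + 1 else d)

def contains_inline_math (markdown_text : String) : Bool :=
  let dollar_count := cimLoop markdown_text.toList 0
  decide (dollar_count % 2 = 0 ∧ dollar_count > 0)

-- ===== PORT B =====
def contains_inline_math_alt (markdown_text : String) : Bool :=
  let stripped := PySem.Str.replace markdown_text "\\$" ""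
  let c := PySem.Str.count stripped "$"
  decide (c % 2 = 0 ∧ c > 0)

-- ===== PRECONDITION & SPEC =====
def Spec_contains_inline_math (markdown_text : String) (out : Bool) : Prop := out = contains_inline_math_alt markdown_text
instance (markdown_text : String) (out : Bool) : Decidable (Spec_contains_inline_math markdown_text out) := by unfold Spec_contains_inline_math; infer_instance

-- ===== CLAIM (what is proved, stated in full; the proofs are below) =====
def Claim_equal_contains_inline_math : Prop := ∀ (markdown_text : String), Dom_contains_inline_math markdown_text → Spec_contains_inline_math markdown_text (contains_inline_math markdown_text)

-- ===== LEMMAS AND PROOFS =====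

-- the escape-stripping scan, as a plain recursion (proof-side model of replace "\$" "")
def cimStrip : List Char → List Char
  | [] => []
  | [c] => [c]
  | c1 :: c2 :: rest =>
    if c1 = '\\' ∧ c2 = '$' then cimStrip rest
    else c1 :: cimStrip (c2 :: rest)

theorem replace_go_strip (fuel : Nat) : ∀ (l acc : List Char), l.length ≤ fuel →
    PySem.Chars.replace.go ['\\', '$'] [] fuel l acc = acc.reverse ++ cimStrip l := by
  induction fuel with
  | zero =>
    intro l acc h
    have : l = [] := List.eq_nil_of_length_eq_zero (Nat.le_zero.mp h)
    subst this
    simp [PySem.Chars.replace.go, cimStrip]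
  | succ n ih =>
    intro l acc h
    match l with
    | [] => simp [PySem.Chars.replace.go, cimStrip]
    | [c] =>
      rw [PySem.Chars.replace.go]
      have hpre : List.isPrefixOf ['\\', '$'] [c] = false := by
        simp [List.isPrefixOf]
      simp only [hpre]
      rw [ih [] (c :: acc) (by simp)]
      simp [cimStrip]
    | c1 :: c2 :: rest =>
      rw [PySem.Chars.replace.go]
      by_cases hc : c1 = '\\' ∧ c2 = '$'
      · obtain ⟨h1, h2⟩ := hc; subst h1; subst h2
        have hpre : List.isPrefixOf ['\\', '$'] ('\\' :: '$' :: rest) = true := by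
          simp [List.isPrefixOf]
        simp only [hpre, if_true, List.length_cons, List.length_nil, List.drop_succ_cons,
          List.drop_zero, List.reverse_nil, List.nil_append, Nat.zero_add]
        rw [ih rest acc (by simp at h ⊢; omega)]
        simp [cimStrip]
      · have hpre : List.isPrefixOf ['\\', '$'] (c1 :: c2 :: rest) = false := by
          simp only [List.isPrefixOf, Bool.and_eq_false_iff, beq_eq_false_iff_ne, ne_eq]
          by_cases h1 : c1 = '\\'
          · right; left; intro h2; exact hc ⟨h1, h2.symm⟩
          · left; intro h'; exact h1 h'.symm
        simp only [hpre, Bool.false_eq_true, if_false]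
        rw [ih (c2 :: rest) (c1 :: acc) (by simp at h ⊢; omega)]
        rw [cimStrip]
        simp [hc]

theorem count_go_dollar (fuel : Nat) : ∀ (l : List Char) (acc : Nat), l.length ≤ fuel →
    PySem.Chars.count.go ['$'] fuel l acc = acc + l.count '$' := by
  induction fuel with
  | zero =>
    intro l acc h
    have : l = [] := List.eq_nil_of_length_eq_zero (Nat.le_zero.mp h)
    subst this
    simp [PySem.Chars.count.go]
  | succ n ih =>
    intro l acc h
    match l with
    | [] => simp [PySem.Chars.count.go]
    | c :: t =>
      rw [PySem.Chars.count.go]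
      by_cases hc : c = '$'
      · subst hc
        have hpre : List.isPrefixOf ['$'] ('$' :: t) = true := by simp [List.isPrefixOf]
        simp only [hpre, if_true, List.length_cons, List.length_nil, List.drop_succ_cons,
          List.drop_zero, Nat.zero_add]
        rw [ih t (acc + 1) (by simpa using h)]
        simp
        omega
      · have hpre : List.isPrefixOf ['$'] (c :: t) = false := by
          simp only [List.isPrefixOf, Bool.and_eq_false_iff, beq_eq_false_iff_ne, ne_eq]; left; intro h'; exact hc h'.symm
        simp only [hpre]
        rw [ih t acc (by simpa using h)]
        simp [hc]

theorem chars_count_dollar (l : List Char) :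
    PySem.Chars.count l ['$'] = l.count '$' := by
  rw [PySem.Chars.count]
  simp only [List.isEmpty_cons, if_false, Bool.false_eq_true]
  simpa using count_go_dollar l.length l 0 (le_refl _)

theorem chars_replace_strip (l : List Char) :
    PySem.Chars.replace l ['\\', '$'] [] = cimStrip l := by
  rw [PySem.Chars.replace]
  simp only [List.isEmpty_cons, if_false, Bool.false_eq_true]
  simpa using replace_go_strip l.length l [] (le_refl _)

theorem cimLoop_strip (l : List Char) (d : Nat) :
    cimLoop l d = d + (cimStrip l).count '$' := by
  induction l, d using cimLoop.induct with
  | case1 d => simp [cimLoop, cimStrip]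
  | case2 d => simp [cimLoop, cimStrip]
  | case3 c d hc => simp [cimLoop, cimStrip, hc]
  | case4 c1 c2 rest d h ih =>
    rw [cimLoop, cimStrip, if_pos h, if_pos h]
    exact ih
  | case5 c1 c2 rest d h ih =>
    rw [cimLoop, cimStrip, if_neg h, if_neg h]
    rw [ih]
    by_cases hc : c1 = '$' <;> simp [hc] <;> omega

-- ===== VERDICT (by name: the statement is the Claim_ definition above) =====
theorem contains_inline_math_spec : Claim_equal_contains_inline_math := by
  intro s _
  unfold Spec_contains_inline_math contains_inline_math contains_inline_math_alt
  have hrep : (PySem.Str.replace s "\\$" "").toList = cimStrip s.toList := by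
    rw [PySem.Str.toList_replace]
    simpa using chars_replace_strip s.toList
  have hcount : PySem.Str.count (PySem.Str.replace s "\\$" "") "$" = (cimStrip s.toList).count '$' := by
    rw [PySem.Str.count_eq, hrep]
    simpa using chars_count_dollar (cimStrip s.toList)
  simp only [hcount, cimLoop_strip s.toList 0, Nat.zero_add]
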